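-- pv_equiv track=rewrite | github.com/0xKilty/base-prime | main.py | get_base_prime
-- ===== SOURCE A (Python) =====
-- primes = [2, 3, 5, 7, 11]
--
-- def get_base_prime(num, base):
--     res = 1
--     i = 0
--     while num > 0:
--         res *= pow(primes[i], num % base)
--         num = num // base
--         i += 1
--     return res
-- ===== SOURCE B (Python) =====
-- primes = [2, 3, 5, 7, 11]
--
-- def get_base_prime(num, base):
--     # closed-form digit extraction: digit i of num is num // base**i % base,
--     # so each prime's exponent is computed independently -- no iterated
--     # division state is carried from one step to the next.
--     if num <= 0:
--         return 1
--     res = 1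
--     for i, p in enumerate(primes):
--         res *= p ** (num // base**i % base)
--     return res
-- ===== Notes on version B (the rewrite author's own statement) =====
-- stated objective: alternative
-- what changed: B replaces A's stateful digit-peeling loop (repeated floor-division of a mutated num with a prime index counter) by a fixed pass over enumerate(primes) where each exponent is the closed-form digit num // base**i % base, computed independently per position.
-- outside the precondition, e.g. on get_base_prime(4, -2): A returns 1, B returns 0.02857142857142857; on get_base_prime(5, -2): A returns 0.5, B returns 0.0047619047619047615
import Mathlib
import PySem

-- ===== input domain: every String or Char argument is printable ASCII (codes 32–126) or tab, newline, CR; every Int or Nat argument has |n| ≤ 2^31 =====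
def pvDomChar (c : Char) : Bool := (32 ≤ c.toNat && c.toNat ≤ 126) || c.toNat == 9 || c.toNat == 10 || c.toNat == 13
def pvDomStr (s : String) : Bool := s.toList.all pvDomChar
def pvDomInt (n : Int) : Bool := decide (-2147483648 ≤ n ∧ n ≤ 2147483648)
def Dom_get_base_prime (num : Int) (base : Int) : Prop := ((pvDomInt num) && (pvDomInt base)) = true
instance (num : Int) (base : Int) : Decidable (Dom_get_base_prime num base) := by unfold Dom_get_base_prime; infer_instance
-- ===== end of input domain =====

-- B computes each prime's exponent by the closed-form digit num // base**i % base over a fixed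
-- pass of enumerate(primes), instead of A's stateful loop peeling digits off a mutated num.

-- ===== PORT A =====
def pvPrimes : List Int := [2, 3, 5, 7, 11]

-- A's while loop; fuel = num.toNat + 1 is enough on every input Pre_ admits
def pvLoopA (base : Int) : Nat → Int → Int → Int → Int
  | 0, _, _, res => res
  | fuel + 1, num, i, res =>
    if num > 0 then
      pvLoopA base fuel (PySem.Int.floordiv num base) (i + 1)
        (res * (PySem.List.pyGetD pvPrimes i 1) ^ (PySem.Int.mod num base).toNat)
    else res

def get_base_prime (num : Int) (base : Int) : Int :=
  pvLoopA base (num.toNat + 1) num 0 1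

-- ===== PORT B =====
-- B: guard for "no digits", then one fold over enumerate(primes) with closed-form digits
def get_base_prime_alt (num : Int) (base : Int) : Int :=
  if num ≤ 0 then 1
  else
    pvPrimes.zipIdx.foldl
      (fun r pi => r * pi.1 ^ (PySem.Int.mod (PySem.Int.floordiv num (base ^ pi.2)) base).toNat) 1

-- ===== PRECONDITION & SPEC =====
-- Pre_ excludes exactly the inputs where A does not return an int: num > 0 with base = 0
-- (ZeroDivisionError), base = 1 (non-termination), base < 0 (float results from negative
-- remainders, or an accidental int when every remainder happens to be even — a quirk of
-- negative-base floor division), and num ≥ base^5 (IndexError past the 5-entry primes table).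
def Pre_get_base_prime (num : Int) (base : Int) : Prop :=
  num ≤ 0 ∨ (2 ≤ base ∧ num < base ^ 5)
instance (num : Int) (base : Int) : Decidable (Pre_get_base_prime num base) := by
  unfold Pre_get_base_prime; infer_instance

def pvWitness_get_base_prime : Int × Int := (10, 2)

def Spec_get_base_prime (num : Int) (base : Int) (out : Int) : Prop := out = get_base_prime_alt num base
instance (num : Int) (base : Int) (out : Int) : Decidable (Spec_get_base_prime num base out) := by unfold Spec_get_base_prime; infer_instance

-- ===== CLAIM (what is proved, stated in full; the proofs are below) =====
def Claim_equal_get_base_prime : Prop := ∀ (num : Int) (base : Int), Dom_get_base_prime num base → Pre_get_base_prime num base → Spec_get_base_prime num base (get_base_prime num base)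

-- ===== LEMMAS AND PROOFS =====

-- proof-side digit list extracted by iterated floor division (the common reference object)
def pvDigits (base : Int) : Nat → Int → List Int
  | 0, _ => []
  | fuel + 1, num =>
    if num > 0 then
      PySem.Int.mod num base :: pvDigits base fuel (PySem.Int.floordiv num base)
    else []

-- proof-side reference: peel digits while walking a prime list
def pvProdForm (base : Int) : List Int → Int → Int → Int
  | [], _, res => res
  | p :: t, num, res =>
      pvProdForm base t (PySem.Int.floordiv num base)
        (res * p ^ (PySem.Int.mod num base).toNat)

-- A's loop at counter i equals the fold over zip of the primes from i on with the digit list,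
-- provided the digits do not run past the primes table.
theorem pvLoopA_eq_fold (base : Int) (fuel : Nat) :
    ∀ (num : Int) (i : Nat) (res : Int),
      i + (pvDigits base fuel num).length ≤ 5 →
      pvLoopA base fuel num (i : Int) res =
        ((pvPrimes.drop i).zip (pvDigits base fuel num)).foldl
          (fun r pd => r * pd.1 ^ pd.2.toNat) res := by
  induction fuel with
  | zero => intro num i res _; simp [pvLoopA, pvDigits]
  | succ fuel ih =>
    intro num i res hlen
    by_cases h : num > 0
    · simp only [pvDigits, if_pos h, List.length_cons] at hlen ⊢
      have hi5 : i < 5 := by omega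
      have hdrop : pvPrimes.drop i =
          PySem.List.pyGetD pvPrimes (i : Int) 1 :: pvPrimes.drop (i + 1) := by
        interval_cases i <;> decide
      simp only [pvLoopA, if_pos h, hdrop, List.zip_cons_cons, List.foldl_cons]
      have := ih (PySem.Int.floordiv num base) (i + 1)
        (res * PySem.List.pyGetD pvPrimes (i : Int) 1 ^ (PySem.Int.mod num base).toNat)
        (by omega)
      push_cast at this ⊢
      exact this
    · simp [pvLoopA, pvDigits, h]

-- num < base^k bounds the number of extracted digits by k (base ≥ 2)
theorem pvDigits_length_le (base : Int) (hb : 2 ≤ base) (fuel : Nat) :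
    ∀ (num : Int) (k : Nat), num < base ^ k → (pvDigits base fuel num).length ≤ k := by
  induction fuel with
  | zero => intro num k _; simp [pvDigits]
  | succ fuel ih =>
    intro num k hk
    by_cases h : num > 0
    · match k with
      | 0 => simp at hk; omega
      | k + 1 =>
        simp only [pvDigits, if_pos h, List.length_cons]
        have hdiv : PySem.Int.floordiv num base < base ^ k := by
          rw [PySem.Int.floordiv_eq_ediv_of_pos (by omega)]
          rw [Int.ediv_lt_iff_lt_mul (by omega)]
          calc num < base ^ (k + 1) := hk
            _ = base ^ k * base := by ring
        have := ih (PySem.Int.floordiv num base) k hdiv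
        omega
    · simp [pvDigits, h]

-- peeling digits off 0 multiplies by p^0 only
theorem pvProdForm_zero (base : Int) (hb : 2 ≤ base) :
    ∀ (t : List Int) (res : Int), pvProdForm base t 0 res = res := by
  intro t
  induction t with
  | nil => intro res; rfl
  | cons p t ih =>
    intro res
    have h1 : PySem.Int.floordiv 0 base = 0 := by
      rw [PySem.Int.floordiv_eq_ediv_of_pos (by omega)]; simp
    have h2 : PySem.Int.mod 0 base = 0 := by
      simp [PySem.Int.mod]
    simp [pvProdForm, h1, h2, ih]

-- the zip-with-digits fold equals the reference peeling recursion (no length side condition)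
theorem fold_zip_eq_prodForm (base : Int) (hb : 2 ≤ base) :
    ∀ (ps : List Int) (fuel : Nat) (num res : Int), 0 ≤ num → num < (fuel : Int) →
      ((ps.zip (pvDigits base fuel num)).foldl
          (fun r pd => r * pd.1 ^ pd.2.toNat) res) = pvProdForm base ps num res := by
  intro ps
  induction ps with
  | nil => intro fuel num res _ _; cases fuel <;> simp [pvDigits, pvProdForm]
  | cons p t ih =>
    intro fuel num res h0 hf
    by_cases h : num > 0
    · match fuel with
      | 0 => omega
      | fuel + 1 =>
        have hlt : PySem.Int.floordiv num base < num := by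
          rw [PySem.Int.floordiv_eq_ediv_of_pos (by omega)]
          rw [Int.ediv_lt_iff_lt_mul (by omega)]
          nlinarith
        have hge : 0 ≤ PySem.Int.floordiv num base := by
          rw [PySem.Int.floordiv_eq_ediv_of_pos (by omega)]
          exact Int.ediv_nonneg h0 (by omega)
        simp only [pvDigits, if_pos h, List.zip_cons_cons, List.foldl_cons, pvProdForm]
        exact ih fuel (PySem.Int.floordiv num base)
          (res * p ^ (PySem.Int.mod num base).toNat) hge (by push_cast at hf ⊢; omega)
    · have hnum : num = 0 := by omega
      subst hnum
      cases fuel <;> simp [pvDigits, pvProdForm_zero base hb]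

-- B's fold over zipIdx starting at n equals the reference recursion on num // base^n
theorem foldB_eq_prodForm (base num0 : Int) (hb : 2 ≤ base) :
    ∀ (ps : List Int) (n : Nat) (res : Int),
      ((ps.zipIdx n).foldl
          (fun r pi => r * pi.1 ^ (PySem.Int.mod (PySem.Int.floordiv num0 (base ^ pi.2)) base).toNat) res)
        = pvProdForm base ps (PySem.Int.floordiv num0 (base ^ n)) res := by
  intro ps
  induction ps with
  | nil => intro n res; rfl
  | cons p t ih =>
    intro n res
    have hcomp : PySem.Int.floordiv (PySem.Int.floordiv num0 (base ^ n)) base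
        = PySem.Int.floordiv num0 (base ^ (n + 1)) := by
      have hbn : (0:Int) < base ^ n := pow_pos (by omega) n
      rw [PySem.Int.floordiv_eq_ediv_of_pos hbn,
          PySem.Int.floordiv_eq_ediv_of_pos (show (0:Int) < base by omega),
          PySem.Int.floordiv_eq_ediv_of_pos (show (0:Int) < base ^ (n+1) by positivity),
          Int.ediv_ediv_of_nonneg (le_of_lt hbn), pow_succ]
    simp only [List.zipIdx_cons, List.foldl_cons, pvProdForm]
    rw [ih (n + 1), hcomp]

-- ===== VERDICT (by name: the statement is the Claim_ definition above) =====
theorem get_base_prime_spec : Claim_equal_get_base_prime := by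
  intro num base _ hpre
  unfold Spec_get_base_prime get_base_prime get_base_prime_alt
  rcases hpre with hle | ⟨hb, hlt⟩
  · have h0 : num.toNat = 0 := Int.toNat_of_nonpos hle
    rw [h0, if_pos hle]
    simp [pvLoopA, show ¬ num > 0 by omega]
  · by_cases hle : num ≤ 0
    · rw [if_pos hle]
      have h0 : num.toNat = 0 := Int.toNat_of_nonpos hle
      rw [h0]
      simp [pvLoopA, show ¬ num > 0 by omega]
    · rw [if_neg hle]
      have hpos : 0 < num := by omega
      have hlen : (pvDigits base (num.toNat + 1) num).length ≤ 5 :=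
        pvDigits_length_le base hb (num.toNat + 1) num 5 hlt
      have hA := pvLoopA_eq_fold base (num.toNat + 1) num 0 1 (by omega)
      have hZ := fold_zip_eq_prodForm base hb pvPrimes (num.toNat + 1) num 1
        (by omega) (by omega)
      have hB := foldB_eq_prodForm base num hb pvPrimes 0 1
      have hdiv1 : PySem.Int.floordiv num (base ^ (0:Nat)) = num := by
        rw [pow_zero, PySem.Int.floordiv_eq_ediv_of_pos Int.one_pos, Int.ediv_one]
      rw [hdiv1] at hB
      norm_num at hA
      rw [hA, hZ, ← hB]
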